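-- pv_equiv track=rewrite | github.com/camall3n/factored-reps | factored_rl/wrappers/basis.py | cartesian_sum
-- ===== SOURCE A (Python) =====
-- def cartesian_sum(max_sum, n_dim):
--     ranks_to_add = list(range(0, max_sum + 1))
--     if n_dim == 1: # base case.
--         return [[r] for r in ranks_to_add]
--     cartesian_products_to_return = []
--     for cartesian_pair in cartesian_sum(max_sum, n_dim - 1):
--         sum_cartesian_pair = sum(cartesian_pair)
--         for r in ranks_to_add:
--             if (sum_cartesian_pair + r) <= max_sum:
--                 cartesian_products_to_return.append(cartesian_pair + [r])
--     return cartesian_products_to_return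
-- ===== SOURCE B (Python) =====
-- def cartesian_sum(max_sum, n_dim):
--     rows = [(0, [])]
--     for _ in range(n_dim):
--         rows = [(s + r, t + [r])
--                 for (s, t) in rows
--                 for r in range(max_sum - s + 1)]
--     return [t for (s, t) in rows]
-- ===== Notes on version B (the rewrite author's own statement) =====
-- stated objective: alternative
-- what changed: Replaced A's recursion that builds each dimension's full candidate list and filters it with a sum test by an iterative fold carrying running sums, whose per-tuple range is bounded by the remaining budget so no rejected tuple is ever generated.
import Mathlib
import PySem

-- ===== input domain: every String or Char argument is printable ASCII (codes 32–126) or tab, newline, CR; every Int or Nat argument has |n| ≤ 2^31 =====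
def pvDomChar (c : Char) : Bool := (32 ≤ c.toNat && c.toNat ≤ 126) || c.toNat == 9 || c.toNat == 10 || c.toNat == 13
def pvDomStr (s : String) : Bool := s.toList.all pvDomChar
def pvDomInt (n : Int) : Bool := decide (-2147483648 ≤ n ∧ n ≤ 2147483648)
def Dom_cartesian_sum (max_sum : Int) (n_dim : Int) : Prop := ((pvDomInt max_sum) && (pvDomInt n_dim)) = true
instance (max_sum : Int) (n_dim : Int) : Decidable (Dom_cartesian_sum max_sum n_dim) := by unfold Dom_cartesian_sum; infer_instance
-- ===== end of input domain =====

-- B replaces A's recursion that builds each level's candidates and filters them by a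
-- sum test with an iterative fold carrying running sums, whose per-tuple range is
-- bounded by the remaining budget so no rejected tuple is generated (objective: alternative).

-- ===== PORT A =====
-- Recursion is on the Nat image of n_dim; Python recurses forever for n_dim ≤ 0
-- (RecursionError), those inputs are outside Pre_ and the port returns [] there.
def csA (ms : Int) : Nat → List (List Int)
  | 0 => []
  | Nat.succ k =>
    let ranks := PySem.List.pyRange 0 (ms + 1) 1
    if k = 0 then
      ranks.map (fun r => [r])
    else
      (csA ms k).foldl (fun acc p =>
        ranks.foldl (fun acc2 r =>
          if p.sum + r ≤ ms then acc2 ++ [p ++ [r]] else acc2) acc) []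

def cartesian_sum (max_sum : Int) (n_dim : Int) : List (List Int) :=
  csA max_sum n_dim.toNat

-- ===== PORT B =====
-- Source B: rows holds (running sum, tuple) pairs; one comprehension per dimension.
def cartesian_sum_alt (max_sum : Int) (n_dim : Int) : List (List Int) :=
  ((PySem.List.pyRange 0 n_dim 1).foldl
    (fun rows _ => rows.flatMap (fun st =>
      (PySem.List.pyRange 0 (max_sum - st.1 + 1) 1).map (fun r => (st.1 + r, st.2 ++ [r]))))
    [((0 : Int), ([] : List Int))]).map (fun st => st.2)

-- ===== PRECONDITION & SPEC =====
-- Pre_ excludes n_dim ≤ 0, where Python A recurses forever (RecursionError).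
def Pre_cartesian_sum (max_sum : Int) (n_dim : Int) : Prop := 1 ≤ n_dim
instance (max_sum : Int) (n_dim : Int) : Decidable (Pre_cartesian_sum max_sum n_dim) := by unfold Pre_cartesian_sum; infer_instance
def pvWitness_cartesian_sum : Int × Int := (3, 2)

def Spec_cartesian_sum (max_sum : Int) (n_dim : Int) (out : List (List Int)) : Prop := out = cartesian_sum_alt max_sum n_dim
instance (max_sum : Int) (n_dim : Int) (out : List (List Int)) : Decidable (Spec_cartesian_sum max_sum n_dim out) := by unfold Spec_cartesian_sum; infer_instance

-- ===== CLAIM (what is proved, stated in full; the proofs are below) =====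
def Claim_equal_cartesian_sum : Prop := ∀ (max_sum : Int) (n_dim : Int), Dom_cartesian_sum max_sum n_dim → Pre_cartesian_sum max_sum n_dim → Spec_cartesian_sum max_sum n_dim (cartesian_sum max_sum n_dim)

-- ===== LEMMAS AND PROOFS =====

-- Proof-side middle ground both ports are compared against: the full grid
-- (leftmost coordinate slowest), filtered by the sum bound.
def prodRep (ranks : List Int) : Nat → List (List Int)
  | 0 => [[]]
  | Nat.succ n => ranks.flatMap (fun x => (prodRep ranks n).map (fun t => x :: t))

-- one pass of B's comprehension
def stepB (ms : Int) (rows : List (Int × List Int)) : List (Int × List Int) :=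
  rows.flatMap (fun st =>
    (PySem.List.pyRange 0 (ms - st.1 + 1) 1).map (fun r => (st.1 + r, st.2 ++ [r])))

-- the grid decomposes equally well on the LAST coordinate (both ports' extension shape)
lemma prodRep_snoc (rs : List Int) (n : Nat) :
    prodRep rs (n + 1) = (prodRep rs n).flatMap (fun t => rs.map (fun x => t ++ [x])) := by
  induction n with
  | zero => simp [prodRep, ← List.map_eq_flatMap]
  | succ n ih =>
    calc prodRep rs (n + 1 + 1)
        = rs.flatMap (fun x => (prodRep rs (n + 1)).map (fun t => x :: t)) := rfl
      _ = rs.flatMap (fun x =>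
            ((prodRep rs n).flatMap (fun t => rs.map (fun y => t ++ [y]))).map
              (fun t => x :: t)) := by rw [ih]
      _ = (prodRep rs (n + 1)).flatMap (fun t => rs.map (fun x => t ++ [x])) := by
            simp [prodRep, List.map_flatMap, List.flatMap_assoc, List.flatMap_map,
              List.map_map, Function.comp_def]

lemma mem_prodRep {rs : List Int} {n : Nat} {t : List Int} (ht : t ∈ prodRep rs n) :
    ∀ x ∈ t, x ∈ rs := by
  induction n generalizing t with
  | zero =>
    simp only [prodRep, List.mem_singleton] at ht
    subst ht; simp
  | succ n ih =>
    simp only [prodRep, List.mem_flatMap, List.mem_map] at ht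
    obtain ⟨r, hr, t', ht', rfl⟩ := ht
    intro x hx
    rcases List.mem_cons.mp hx with rfl | hx
    · exact hr
    · exact ih ht' x hx

lemma flatMap_filter_of_nil {α β : Type} (l : List α) (p : α → Bool) (f : α → List β)
    (h : ∀ t ∈ l, p t = false → f t = []) :
    (l.filter p).flatMap f = l.flatMap f := by
  induction l with
  | nil => rfl
  | cons a l ih =>
    by_cases ha : p a = true
    · simp [ha, ih (fun t ht => h t (List.mem_cons_of_mem a ht))]
    · simp only [Bool.not_eq_true] at ha
      simp [ha, h a (List.mem_cons_self) ha,
        ih (fun t ht => h t (List.mem_cons_of_mem a ht))]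

-- A's level-k list is the filtered grid
lemma csA_eq (ms : Int) (k : Nat) :
    csA ms (k + 1) = (prodRep (PySem.List.pyRange 0 (ms + 1) 1) (k + 1)).filter
      (fun t => decide (t.sum ≤ ms)) := by
  induction k with
  | zero =>
    simp only [csA, prodRep]
    rw [List.filter_eq_self.mpr]
    · simp [← List.map_eq_flatMap]
    · intro t ht
      simp only [List.mem_flatMap, List.mem_map] at ht
      obtain ⟨r, hr, t', ht', rfl⟩ := ht
      simp only [List.mem_singleton] at ht'
      subst ht'
      have := (PySem.List.mem_pyRange_one.mp hr).2
      simp; omega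
  | succ k ih =>
    have hstep : csA ms (k + 1 + 1) =
        (csA ms (k + 1)).flatMap (fun p =>
          ((PySem.List.pyRange 0 (ms + 1) 1).filter (fun r => decide (p.sum + r ≤ ms))).map
            (fun r => p ++ [r])) := by
      show (csA ms (k + 1)).foldl _ [] = _
      induction (csA ms (k + 1)) using List.reverseRecOn with
      | nil => rfl
      | append_singleton l p ihl =>
        rw [List.foldl_append, List.flatMap_append, ← ihl]
        simp [PySem.List.foldl_append_ite]
    rw [hstep, ih,
      flatMap_filter_of_nil _ _ _ (by
        intro t _ hts
        simp only [decide_eq_false_iff_not, not_le] at hts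
        rw [List.filter_eq_nil_iff.mpr, List.map_nil]
        intro r hr
        have := (PySem.List.mem_pyRange_one.mp hr).1
        simp; omega)]
    conv_rhs => rw [prodRep_snoc]
    rw [List.filter_flatMap]
    refine List.flatMap_congr ?_
    intro t _
    rw [List.filter_map]
    congr 1
    apply List.filter_congr
    intro r _
    simp [List.sum_append]

-- B's budget-bounded range is A's filtered ranks (for a prefix still inside budget)
lemma pyRange_budget (ms c : Int) (h0 : 0 ≤ c) (hc : c ≤ ms) :
    PySem.List.pyRange 0 (c + 1) 1 =
      (PySem.List.pyRange 0 (ms + 1) 1).filter (fun r => decide (r ≤ c)) := by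
  rw [PySem.List.pyRange_one_append 0 (c + 1) (ms + 1) (by omega) (by omega),
    List.filter_append,
    List.filter_eq_self.mpr (by
      intro r hr
      have := (PySem.List.mem_pyRange_one.mp hr).2
      simp; omega),
    List.filter_eq_nil_iff.mpr (by
      intro r hr
      have := (PySem.List.mem_pyRange_one.mp hr).1
      simp; omega),
    List.append_nil]

-- B's rows after n passes: the filtered grid, each tuple paired with its sum
lemma stepB_iter (ms : Int) (hms : 0 ≤ ms) (n : Nat) :
    (stepB ms)^[n] [((0 : Int), ([] : List Int))] =
      ((prodRep (PySem.List.pyRange 0 (ms + 1) 1) n).filter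
        (fun t => decide (t.sum ≤ ms))).map (fun t => (t.sum, t)) := by
  induction n with
  | zero =>
    simp only [Function.iterate_zero, id_eq, prodRep]
    rw [List.filter_eq_self.mpr (by intro t ht; simp only [List.mem_singleton] at ht; subst ht; simpa)]
    simp
  | succ n ih =>
    rw [Function.iterate_succ_apply', ih]
    show ((((prodRep _ n).filter _).map (fun t => (t.sum, t))).flatMap _) = _
    rw [List.flatMap_map]
    conv_rhs => rw [prodRep_snoc]
    rw [List.filter_flatMap, List.map_flatMap, ←
      flatMap_filter_of_nil (prodRep (PySem.List.pyRange 0 (ms + 1) 1) n)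
        (fun t => decide (t.sum ≤ ms)) _ (by
          intro t _ hts
          simp only [decide_eq_false_iff_not, not_le] at hts
          have hf : ((PySem.List.pyRange 0 (ms + 1) 1).map (fun x => t ++ [x])).filter
              (fun u => decide (u.sum ≤ ms)) = [] := List.filter_eq_nil_iff.mpr (by
            intro u hu
            simp only [List.mem_map] at hu
            obtain ⟨r', hr', rfl⟩ := hu
            have h0 : 0 ≤ r' := (PySem.List.mem_pyRange_one.mp hr').1
            simp only [decide_eq_true_eq, List.sum_append, List.sum_cons, List.sum_nil]
            omega)
          show (((PySem.List.pyRange 0 (ms + 1) 1).map (fun x => t ++ [x])).filter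
              (fun u => decide (u.sum ≤ ms))).map (fun t => (t.sum, t)) = []
          rw [hf]; rfl)]
    refine List.flatMap_congr ?_
    intro t ht
    have hts : t.sum ≤ ms := by
      have := (List.mem_filter.mp ht).2
      simpa using this
    have htn : 0 ≤ t.sum := List.sum_nonneg (fun x hx => by
      have := (PySem.List.mem_pyRange_one.mp
        (mem_prodRep (List.mem_filter.mp ht).1 x hx)).1
      omega)
    rw [pyRange_budget ms (ms - t.sum) (by omega) (by omega), List.filter_map, List.map_map,
      show List.filter (fun r => decide (r ≤ ms - t.sum)) (PySem.List.pyRange 0 (ms + 1) 1) =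
          List.filter ((fun u => decide (u.sum ≤ ms)) ∘ fun x => t ++ [x])
            (PySem.List.pyRange 0 (ms + 1) 1) from List.filter_congr (by
        intro r _
        simp only [Function.comp_apply, List.sum_append, List.sum_cons, List.sum_nil,
          decide_eq_decide]
        omega)]
    apply List.map_congr_left
    intro r _
    simp [List.sum_append]

-- for a negative budget B's rows empty out after the first pass
lemma stepB_iter_neg (ms : Int) (hms : ms < 0) (n : Nat) :
    (stepB ms)^[n + 1] [((0 : Int), ([] : List Int))] = [] := by
  induction n with
  | zero =>
    show stepB ms [((0 : Int), ([] : List Int))] = []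
    simp only [stepB, List.flatMap_cons, List.flatMap_nil, List.append_nil]
    rw [PySem.List.pyRange_one_eq_nil (by omega)]
    rfl
  | succ n ih =>
    rw [Function.iterate_succ_apply', ih]
    rfl

-- ===== VERDICT (by name: the statement is the Claim_ definition above) =====
theorem cartesian_sum_spec : Claim_equal_cartesian_sum := by
  intro ms nd _ hpre
  have hnd : 1 ≤ nd := hpre
  have h1 : nd.toNat = (nd.toNat - 1) + 1 := by omega
  show cartesian_sum ms nd = cartesian_sum_alt ms nd
  unfold cartesian_sum cartesian_sum_alt
  rw [List.foldl_const, PySem.List.length_pyRange_one]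
  have hlen : (nd - 0).toNat = nd.toNat := by omega
  rw [hlen, h1, csA_eq]
  by_cases hms : 0 ≤ ms
  · rw [show ((fun rows => rows.flatMap (fun st =>
        (PySem.List.pyRange 0 (ms - st.1 + 1) 1).map (fun r => (st.1 + r, st.2 ++ [r]))))^[nd.toNat - 1 + 1]
        [((0 : Int), ([] : List Int))]) = (stepB ms)^[nd.toNat - 1 + 1] [((0 : Int), ([] : List Int))] from rfl,
      stepB_iter ms hms]
    simp [Function.comp_def]
  · rw [show ((fun rows => rows.flatMap (fun st =>
        (PySem.List.pyRange 0 (ms - st.1 + 1) 1).map (fun r => (st.1 + r, st.2 ++ [r]))))^[nd.toNat - 1 + 1]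
        [((0 : Int), ([] : List Int))]) = (stepB ms)^[nd.toNat - 1 + 1] [((0 : Int), ([] : List Int))] from rfl,
      stepB_iter_neg ms (by omega)]
    have hnil : PySem.List.pyRange 0 (ms + 1) 1 = [] :=
      PySem.List.pyRange_one_eq_nil (by omega)
    rw [hnil]
    simp [prodRep]
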